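-- pv_equiv track=rewrite | github.com/aslitaser/ml-inference-optimizer | parallelism/communication.py | create_pipeline_schedule
-- ===== SOURCE A (Python) =====
-- from typing import Optional, List, Tuple, Dict, Any, Callable, Union
--
-- def create_pipeline_schedule(num_chunks: int, sp_size: int) -> List[Tuple[int, int]]:
--     """
--     Create a schedule for pipeline-parallel execution with sequence parallelism.
--
--     This function generates a schedule of send/recv operations for pipelined
--     execution, allowing communication and computation to be overlapped.
--
--     Args:
--         num_chunks: Number of sequence chunks
--         sp_size: Sequence parallel size
--
--     Returns:
--         List of (sender_rank, receiver_rank) tuples representing the communication schedule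
--     """
--     schedule = []
--
--     # Create a basic linear pipeline schedule
--     for step in range(num_chunks + sp_size - 1):
--         step_comms = []
--
--         for sender in range(sp_size - 1):
--             receiver = sender + 1
--             chunk_idx = step - sender
--
--             if 0 <= chunk_idx < num_chunks:
--                 step_comms.append((sender, receiver))
--
--         if step_comms:
--             schedule.append(step_comms)
--
--     return schedule
-- ===== SOURCE B (Python) =====
-- def create_pipeline_schedule(num_chunks: int, sp_size: int):
--     schedule = []
--     for step in range(num_chunks + sp_size - 1):
--         lo = max(0, step - num_chunks + 1)
--         hi = min(sp_size - 1, step + 1)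
--         if lo < hi:
--             schedule.append([(s, s + 1) for s in range(lo, hi)])
--     return schedule
-- ===== Notes on version B (the rewrite author's own statement) =====
-- stated objective: alternative
-- what changed: Replaced the inner scan over all senders with a guard per sender by a closed-form band [max(0, step-num_chunks+1), min(sp_size-1, step+1)) of valid senders, emitted directly and appended when nonempty.
import Mathlib
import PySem

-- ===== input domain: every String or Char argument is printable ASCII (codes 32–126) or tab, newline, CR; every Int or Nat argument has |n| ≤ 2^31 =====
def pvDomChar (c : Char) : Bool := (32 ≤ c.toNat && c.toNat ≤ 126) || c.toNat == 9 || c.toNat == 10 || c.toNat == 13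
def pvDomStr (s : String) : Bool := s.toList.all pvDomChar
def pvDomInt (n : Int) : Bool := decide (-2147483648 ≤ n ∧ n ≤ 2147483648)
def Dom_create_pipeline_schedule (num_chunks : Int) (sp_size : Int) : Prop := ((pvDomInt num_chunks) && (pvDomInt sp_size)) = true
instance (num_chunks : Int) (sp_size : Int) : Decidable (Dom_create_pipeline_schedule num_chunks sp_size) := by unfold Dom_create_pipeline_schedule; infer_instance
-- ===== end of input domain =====

-- B replaces the inner per-sender scan-and-filter by a closed-form band of valid senders (alternative decomposition, same output).
-- ===== PORT A =====
def create_pipeline_schedule (num_chunks : Int) (sp_size : Int) : List (List (Int × Int)) :=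
  (PySem.List.pyRange 0 (num_chunks + sp_size - 1) 1).foldl (fun schedule step =>
    let step_comms := (PySem.List.pyRange 0 (sp_size - 1) 1).foldl (fun acc sender =>
      let receiver := sender + 1
      let chunk_idx := step - sender
      if 0 ≤ chunk_idx ∧ chunk_idx < num_chunks then acc ++ [(sender, receiver)] else acc) []
    if step_comms ≠ [] then schedule ++ [step_comms] else schedule) []

-- ===== PORT B =====
def create_pipeline_schedule_alt (num_chunks : Int) (sp_size : Int) : List (List (Int × Int)) :=
  (PySem.List.pyRange 0 (num_chunks + sp_size - 1) 1).foldl (fun schedule step =>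
    let lo := max 0 (step - num_chunks + 1)
    let hi := min (sp_size - 1) (step + 1)
    if lo < hi then schedule ++ [(PySem.List.pyRange lo hi 1).map (fun s => (s, s + 1))]
    else schedule) []

-- ===== PRECONDITION & SPEC =====
def Spec_create_pipeline_schedule (num_chunks : Int) (sp_size : Int) (out : List (List (Int × Int))) : Prop := out = create_pipeline_schedule_alt num_chunks sp_size
instance (num_chunks : Int) (sp_size : Int) (out : List (List (Int × Int))) : Decidable (Spec_create_pipeline_schedule num_chunks sp_size out) := by unfold Spec_create_pipeline_schedule; infer_instance

-- ===== CLAIM (what is proved, stated in full; the proofs are below) =====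
def Claim_equal_create_pipeline_schedule : Prop := ∀ (num_chunks : Int) (sp_size : Int), Dom_create_pipeline_schedule num_chunks sp_size → Spec_create_pipeline_schedule num_chunks sp_size (create_pipeline_schedule num_chunks sp_size)

-- ===== LEMMAS AND PROOFS =====

-- filtering an ascending unit range by an interval condition yields the intersected range
theorem filter_pyRange_interval (lo hi : Int) : ∀ (n : Nat) (a b : Int), (b - a).toNat = n →
    (PySem.List.pyRange a b 1).filter (fun x => decide (lo ≤ x ∧ x < hi)) =
      PySem.List.pyRange (max a lo) (min b hi) 1 := by
  intro n
  induction n with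
  | zero =>
    intro a b h
    have hba : b ≤ a := by omega
    rw [PySem.List.pyRange_one_eq_nil hba, PySem.List.pyRange_one_eq_nil (by omega)]
    rfl
  | succ k ih =>
    intro a b h
    have hab : a < b := by omega
    rw [PySem.List.pyRange_one_cons hab, List.filter_cons, ih (a+1) b (by omega)]
    by_cases hc : lo ≤ a ∧ a < hi
    · obtain ⟨h1, h2⟩ := hc
      simp only [h1, h2, and_self, decide_true, if_true]
      rw [max_eq_left h1, max_eq_left (show lo ≤ a + 1 by omega),
        PySem.List.pyRange_one_cons (show a < min b hi by omega)]
    · rw [if_neg (by simpa using hc)]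
      rcases not_and_or.mp hc with h | h
      · have hlo : a < lo := by omega
        rw [max_eq_right (show a ≤ lo by omega), max_eq_right (show a + 1 ≤ lo by omega)]
      · have hhi : hi ≤ a := by omega
        rw [PySem.List.pyRange_one_eq_nil (by omega), PySem.List.pyRange_one_eq_nil (by omega)]

-- the two step bodies agree for every step and accumulator
theorem step_eq (num_chunks sp_size : Int) (schedule : List (List (Int × Int))) (step : Int) :
    (let step_comms := (PySem.List.pyRange 0 (sp_size - 1) 1).foldl (fun acc sender =>
        let receiver := sender + 1
        let chunk_idx := step - sender
        if 0 ≤ chunk_idx ∧ chunk_idx < num_chunks then acc ++ [(sender, receiver)] else acc) []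
     if step_comms ≠ [] then schedule ++ [step_comms] else schedule) =
    (let lo := max 0 (step - num_chunks + 1)
     let hi := min (sp_size - 1) (step + 1)
     if lo < hi then schedule ++ [(PySem.List.pyRange lo hi 1).map (fun s => (s, s + 1))]
     else schedule) := by
  simp only []
  rw [PySem.List.foldl_append_ite
        (p := fun sender => 0 ≤ step - sender ∧ step - sender < num_chunks)
        (f := fun sender => (sender, sender + 1))]
  rw [List.filter_congr (q := fun x => decide (step - num_chunks + 1 ≤ x ∧ x < step + 1))
        (fun x _ => by simp only [decide_eq_decide]; omega)]
  rw [filter_pyRange_interval (step - num_chunks + 1) (step + 1)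
        ((sp_size - 1) - 0).toNat 0 (sp_size - 1) rfl]
  simp only [List.nil_append]
  by_cases hlt : max 0 (step - num_chunks + 1) < min (sp_size - 1) (step + 1)
  · rw [if_pos hlt, if_pos]
    rw [PySem.List.pyRange_one_cons hlt]
    simp
  · rw [if_neg hlt, if_neg]
    rw [PySem.List.pyRange_one_eq_nil (by omega)]
    simp

-- ===== VERDICT (by name: the statement is the Claim_ definition above) =====
theorem create_pipeline_schedule_spec : Claim_equal_create_pipeline_schedule := by
  intro num_chunks sp_size _
  unfold Spec_create_pipeline_schedule create_pipeline_schedule create_pipeline_schedule_alt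
  refine PySem.List.foldl_congr_mem _ _ _ _ ?_
  intro acc step _
  exact step_eq num_chunks sp_size acc step
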